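-- pv_equiv track=rewrite | github.com/yule-studio/yule-studio-agent | src/yule_orchestrator/discord/formatter.py | _paragraph_lines
-- ===== SOURCE A (Python) =====
-- def _paragraph_lines(text: str) -> list[str]:
--     if not text:
--         return []
--     raw_lines = text.replace("\r\n", "\n").splitlines()
--     result: list[str] = []
--     previous_blank = False
--     started = False
--     for raw in raw_lines:
--         line = raw.rstrip()
--         if not line.strip():
--             if not started or previous_blank:
--                 continue
--             result.append("")
--             previous_blank = True
--             continue
--         result.append(line)
--         previous_blank = False
--         started = True
--     while result and not result[-1].strip():
--         result.pop()
--     return result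
-- ===== SOURCE B (Python) =====
-- def _paragraph_lines(text: str) -> list[str]:
--     if not text:
--         return []
--     lines = [l.rstrip() for l in text.replace("\r\n", "\n").splitlines()]
--     out: list[str] = []
--     i = 0
--     n = len(lines)
--     while i < n:
--         if not lines[i].strip():
--             # a run of blank lines collapses to a single empty entry
--             while i < n and not lines[i].strip():
--                 i += 1
--             out.append("")
--         else:
--             out.append(lines[i])
--             i += 1
--     while out and out[0] == "":
--         out.pop(0)
--     while out and out[-1] == "":
--         out.pop()
--     return out
-- ===== Notes on version B (the rewrite author's own statement) =====
-- stated objective: alternative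
-- what changed: Replaces A's single-pass state machine (previous_blank/started flags plus a trailing pop loop) with a group-then-trim decomposition: rstrip all lines first, collapse each run of blank lines to one empty entry, then trim leading and trailing empty entries.
import Mathlib
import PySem

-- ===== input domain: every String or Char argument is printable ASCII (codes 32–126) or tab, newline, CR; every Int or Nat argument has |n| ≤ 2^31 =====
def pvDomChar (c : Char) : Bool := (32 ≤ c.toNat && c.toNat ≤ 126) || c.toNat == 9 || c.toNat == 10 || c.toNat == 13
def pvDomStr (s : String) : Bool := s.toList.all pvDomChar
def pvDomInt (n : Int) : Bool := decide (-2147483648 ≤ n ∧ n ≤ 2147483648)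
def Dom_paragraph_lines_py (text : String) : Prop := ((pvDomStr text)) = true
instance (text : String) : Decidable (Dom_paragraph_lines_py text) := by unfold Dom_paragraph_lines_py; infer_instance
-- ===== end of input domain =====

-- B replaces A's flag-driven single pass with a group-runs-then-trim decomposition (same cost; clearer structure).


-- ===== PORT A =====
-- blank test 'not line.strip()' used by both programs
def pvBlank (l : String) : Bool := decide (PySem.Str.strip l = "")

-- loop body of A's for-loop; state = (result, previous_blank, started)
def pvStepA (st : List String × Bool × Bool) (raw : String) : List String × Bool × Bool :=
  let line := PySem.Str.rstrip raw
  if pvBlank line then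
    if !st.2.2 || st.2.1 then st
    else (st.1 ++ [""], true, st.2.2)
  else (st.1 ++ [line], false, true)

def paragraph_lines_py (text : String) : List String :=
  if text = "" then []
  else
    let raw_lines := PySem.Str.splitlines (PySem.Str.replace text "\r\n" "\n")
    let st := raw_lines.foldl pvStepA ([], false, false)
    -- 'while result and not result[-1].strip(): result.pop()'
    (st.1.reverse.dropWhile pvBlank).reverse

-- ===== PORT B =====
-- collapse each run of blank lines to a single "" entry, keep other lines
def pvCollapse : List String → List String
  | [] => []
  | l :: ls =>
    if pvBlank l then "" :: pvCollapse (ls.dropWhile pvBlank)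
    else l :: pvCollapse ls
  termination_by ls => ls.length
  decreasing_by
    · simpa using Nat.lt_succ_of_le (List.length_dropWhile_le _ _)
    · simp

def paragraph_lines_py_alt (text : String) : List String :=
  if text = "" then []
  else
    let lines := (PySem.Str.splitlines (PySem.Str.replace text "\r\n" "\n")).map PySem.Str.rstrip
    let out := pvCollapse lines
    -- trim leading and trailing "" entries
    (((out.dropWhile (· == "")).reverse.dropWhile (· == "")).reverse)

-- ===== PRECONDITION & SPEC =====
def Spec_paragraph_lines_py (text : String) (out : List String) : Prop := out = paragraph_lines_py_alt text
instance (text : String) (out : List String) : Decidable (Spec_paragraph_lines_py text out) := by unfold Spec_paragraph_lines_py; infer_instance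

-- ===== CLAIM (what is proved, stated in full; the proofs are below) =====
def Claim_equal_paragraph_lines_py : Prop := ∀ (text : String), Dom_paragraph_lines_py text → Spec_paragraph_lines_py text (paragraph_lines_py text)

-- ===== LEMMAS AND PROOFS =====

-- A's started phase result, as a recursion (proof-only)
def pvF : Bool → List String → List String
  | _, [] => []
  | pb, l :: ls =>
    if pvBlank l then (if pb then pvF true ls else "" :: pvF true ls)
    else l :: pvF false ls

theorem pvBlank_empty : pvBlank "" = true := by decide

-- fold over raw lines = fold of the rstripped lines with the rstrip-free step
def pvStepA' (st : List String × Bool × Bool) (l : String) : List String × Bool × Bool :=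
  if pvBlank l then
    if !st.2.2 || st.2.1 then st
    else (st.1 ++ [""], true, st.2.2)
  else (st.1 ++ [l], false, true)

theorem foldl_stepA (init : List String × Bool × Bool) (ls : List String) :
    ls.foldl pvStepA init = (ls.map PySem.Str.rstrip).foldl pvStepA' init := by
  rw [List.foldl_map]; rfl

-- before started: blanks are skipped and state stays put
theorem foldl_not_started (ls : List String) (pb : Bool) :
    ls.foldl pvStepA' ([], pb, false) = (ls.dropWhile pvBlank).foldl pvStepA' ([], pb, false) := by
  induction ls with
  | nil => rfl
  | cons l ls ih =>
    by_cases h : pvBlank l = true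
    · simp [List.foldl_cons, pvStepA', h, ih]
    · simp [h]

-- after started: the result grows by pvF
theorem foldl_started (ls : List String) : ∀ (res : List String) (pb : Bool),
    (ls.foldl pvStepA' (res, pb, true)).1 = res ++ pvF pb ls := by
  induction ls with
  | nil => simp [pvF]
  | cons l ls ih =>
    intro res pb
    by_cases h : pvBlank l = true
    · cases pb with
      | true => simp [List.foldl_cons, pvStepA', h, pvF, ih]
      | false => simp [List.foldl_cons, pvStepA', h, pvF, ih]
    · simp [List.foldl_cons, pvStepA', h, pvF, ih]

theorem pvF_true (ls : List String) : pvF true ls = pvF false (ls.dropWhile pvBlank) := by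
  induction ls with
  | nil => rfl
  | cons l ls ih =>
    by_cases h : pvBlank l = true
    · simp [pvF, h, ih]
    · simp [pvF, h]

theorem pvF_false_eq_collapse (ls : List String) : pvF false ls = pvCollapse ls := by
  induction hls : ls.length using Nat.strong_induction_on generalizing ls with
  | _ n ih =>
    cases ls with
    | nil => simp [pvF, pvCollapse]
    | cons l ls =>
      subst hls
      by_cases h : pvBlank l = true
      · rw [pvF, pvCollapse]
        simp only [h, if_true, pvF_true, Bool.false_eq_true, if_false]
        rw [ih (ls.dropWhile pvBlank).length
            (by simpa using Nat.lt_succ_of_le (List.length_dropWhile_le _ _)) _ rfl]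
      · rw [pvF, pvCollapse]
        simp only [h, Bool.false_eq_true, if_false]
        rw [ih ls.length (by simp) _ rfl]

-- every entry of a collapsed list is "" or non-blank
theorem mem_collapse (ls : List String) : ∀ x ∈ pvCollapse ls, x = "" ∨ pvBlank x = false := by
  induction hls : ls.length using Nat.strong_induction_on generalizing ls with
  | _ n ih =>
    cases ls with
    | nil => simp [pvCollapse]
    | cons l ls =>
      subst hls
      by_cases h : pvBlank l = true
      · rw [pvCollapse]; simp only [h, if_true]
        intro x hx
        rcases List.mem_cons.mp hx with rfl | hx
        · exact Or.inl rfl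
        · exact ih (ls.dropWhile pvBlank).length
            (by simpa using Nat.lt_succ_of_le (List.length_dropWhile_le _ _)) _ rfl x hx
      · rw [pvCollapse]; simp only [h]
        intro x hx
        rcases List.mem_cons.mp hx with rfl | hx
        · exact Or.inr (by simpa using h)
        · exact ih ls.length (by simp) _ rfl x hx

-- on such lists the "" test and the blank test drop the same prefix
theorem dropWhile_congr_blank (xs : List String)
    (h : ∀ x ∈ xs, x = "" ∨ pvBlank x = false) :
    xs.dropWhile (· == "") = xs.dropWhile pvBlank := by
  induction xs with
  | nil => rfl
  | cons x xs ih =>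
    rcases h x (List.mem_cons_self) with rfl | hx
    · simp [pvBlank_empty,
        ih (fun y hy => h y (List.mem_cons_of_mem _ hy))]
    · have hne : x ≠ "" := by rintro rfl; rw [pvBlank_empty] at hx; cases hx
      simp [hx, hne]

-- trimming a leading blank run off the collapsed list = collapsing the dropped list
theorem dropWhile_collapse (ls : List String) :
    (pvCollapse ls).dropWhile pvBlank = pvCollapse (ls.dropWhile pvBlank) := by
  cases ls with
  | nil => simp [pvCollapse]
  | cons l ls =>
    by_cases h : pvBlank l = true
    · rw [pvCollapse]
      simp only [h, if_true, List.dropWhile_cons, pvBlank_empty]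
      cases hd : ls.dropWhile pvBlank with
      | nil => simp [pvCollapse]
      | cons y ys =>
        have hy : pvBlank y = false := by
          have := List.dropWhile_get_zero_not (p := pvBlank) (l := ls) (by simp [hd])
          simpa [hd] using this
        rw [pvCollapse]
        simp [hy]
    · conv_lhs => rw [pvCollapse]
      conv_rhs => rw [List.dropWhile_cons]
      simp [h, pvCollapse]

-- main per-line-list equivalence
theorem core_eq (ls : List String) :
    ((ls.foldl pvStepA' ([], false, false)).1.reverse.dropWhile pvBlank).reverse =
      ((((pvCollapse ls).dropWhile (· == "")).reverse.dropWhile (· == "")).reverse) := by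
  have hlead : (pvCollapse ls).dropWhile (· == "") = pvCollapse (ls.dropWhile pvBlank) := by
    rw [dropWhile_congr_blank _ (mem_collapse ls), dropWhile_collapse]
  rw [hlead]
  rw [foldl_not_started]
  cases hd : ls.dropWhile pvBlank with
  | nil => simp [pvCollapse]
  | cons l rest =>
    have hl : pvBlank l = false := by
      have := List.dropWhile_get_zero_not (p := pvBlank) (l := ls) (by simp [hd])
      simpa [hd] using this
    have hstep : (l :: rest).foldl pvStepA' ([], false, false) =
        rest.foldl pvStepA' (([] : List String) ++ [l], false, true) := by
      simp [List.foldl_cons, pvStepA', hl]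
    rw [hstep, foldl_started]
    have hcol : pvCollapse (l :: rest) = l :: pvCollapse rest := by
      rw [pvCollapse]; simp [hl]
    rw [hcol]
    have hrev : ∀ x ∈ (l :: pvCollapse rest).reverse, x = "" ∨ pvBlank x = false := by
      intro x hx
      rcases List.mem_cons.mp (List.mem_reverse.mp hx) with rfl | hx'
      · exact Or.inr hl
      · exact mem_collapse rest x hx'
    rw [dropWhile_congr_blank _ hrev]
    rw [show ([] : List String) ++ [l] ++ pvF false rest = l :: pvCollapse rest from by
      simp [pvF_false_eq_collapse]]

-- ===== VERDICT (by name: the statement is the Claim_ definition above) =====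
theorem paragraph_lines_py_spec : Claim_equal_paragraph_lines_py := by
  intro text _
  unfold Spec_paragraph_lines_py paragraph_lines_py paragraph_lines_py_alt
  by_cases ht : text = ""
  · simp [ht]
  · simp only [ht, if_false]
    rw [foldl_stepA]
    exact core_eq _
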